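-- pv_equiv track=rewrite | github.com/INDavid04/ubb-pa | laboratoare/12dec24.py | f
-- ===== SOURCE A (Python) =====
-- def f (lista, p, u):
--     if (u - p <= 2):
--         return sum(lista[p:u+1])
--     k = (u - p + 1) // 3
--     aux_1 = sum(lista[p:p+k])
--     aux_2 = f(lista, p + k + 1, p + 2 * k - 1)
--     aux_3 = sum(lista[p + 2 * k + 1 : u + 1])
--     return sum([aux_1, aux_2, aux_3])
-- ===== SOURCE B (Python) =====
-- def f(lista, p, u):
--     stack = []
--     while u - p > 2:
--         k = (u - p + 1) // 3
--         stack.append((sum(lista[p:p+k]), sum(lista[p + 2*k + 1 : u + 1])))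
--         p, u = p + k + 1, p + 2*k - 1
--     acc = sum(lista[p:u+1])
--     while stack:
--         a1, a3 = stack.pop()
--         acc = a1 + acc + a3
--     return acc
-- ===== Notes on version B (the rewrite author's own statement) =====
-- stated objective: alternative
-- what changed: Replaces the nested recursion by an iterative loop that pushes the two outer partial sums on an explicit stack, then folds the stack back over the base-case sum, grouping additions innermost-first exactly as the recursion does.
import Mathlib
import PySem

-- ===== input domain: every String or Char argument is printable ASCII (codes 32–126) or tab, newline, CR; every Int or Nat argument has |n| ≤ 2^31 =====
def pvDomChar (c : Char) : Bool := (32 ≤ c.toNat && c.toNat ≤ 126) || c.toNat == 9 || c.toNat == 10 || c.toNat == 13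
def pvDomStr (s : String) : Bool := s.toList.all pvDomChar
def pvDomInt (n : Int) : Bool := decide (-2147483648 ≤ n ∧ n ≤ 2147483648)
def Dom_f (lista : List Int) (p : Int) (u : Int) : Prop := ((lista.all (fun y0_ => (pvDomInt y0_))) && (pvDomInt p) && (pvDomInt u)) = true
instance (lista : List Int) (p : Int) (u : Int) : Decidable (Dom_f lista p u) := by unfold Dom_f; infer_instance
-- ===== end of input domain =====

-- B: iterative explicit-stack version of A's recursion (alternative decomposition, same cost).

-- ===== PORT A =====
def f (lista : List Int) (p : Int) (u : Int) : Int :=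
  if u - p ≤ 2 then (PySem.List.slice lista (some p) (some (u + 1))).sum
  else
    let k := PySem.Int.floordiv (u - p + 1) 3
    let aux_1 := (PySem.List.slice lista (some p) (some (p + k))).sum
    let aux_2 := f lista (p + k + 1) (p + 2 * k - 1)
    let aux_3 := (PySem.List.slice lista (some (p + 2 * k + 1)) (some (u + 1))).sum
    aux_1 + aux_2 + aux_3
termination_by (u - p).toNat
decreasing_by
  have hk : PySem.Int.floordiv (u - p + 1) 3 = (u - p + 1) / 3 :=
    PySem.Int.floordiv_eq_ediv_of_pos (by omega)
  simp only [hk]; omega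

-- ===== PORT B =====
-- the while-loop of Source B: push (aux_1, aux_3) pairs, narrowing (p, u)
def fAltLoop (lista : List Int) (p : Int) (u : Int) (stack : List (Int × Int)) :
    List (Int × Int) × Int × Int :=
  if u - p ≤ 2 then (stack, p, u)
  else
    let k := PySem.Int.floordiv (u - p + 1) 3
    fAltLoop lista (p + k + 1) (p + 2 * k - 1)
      (((PySem.List.slice lista (some p) (some (p + k))).sum,
        (PySem.List.slice lista (some (p + 2 * k + 1)) (some (u + 1))).sum) :: stack)
termination_by (u - p).toNat
decreasing_by
  have hk : PySem.Int.floordiv (u - p + 1) 3 = (u - p + 1) / 3 :=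
    PySem.Int.floordiv_eq_ediv_of_pos (by omega)
  simp only [hk]; omega

def f_alt (lista : List Int) (p : Int) (u : Int) : Int :=
  let r := fAltLoop lista p u []
  r.1.foldl (fun acc pr => pr.1 + acc + pr.2)
    ((PySem.List.slice lista (some r.2.1) (some (r.2.2 + 1))).sum)

-- ===== PRECONDITION & SPEC =====
def Spec_f (lista : List Int) (p : Int) (u : Int) (out : Int) : Prop := out = f_alt lista p u
instance (lista : List Int) (p : Int) (u : Int) (out : Int) : Decidable (Spec_f lista p u out) := by unfold Spec_f; infer_instance

-- ===== CLAIM (what is proved, stated in full; the proofs are below) =====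
def Claim_equal_f : Prop := ∀ (lista : List Int) (p : Int) (u : Int), Dom_f lista p u → Spec_f lista p u (f lista p u)

-- ===== LEMMAS AND PROOFS =====
lemma fAltLoop_spec (lista : List Int) (p u : Int) (stack : List (Int × Int)) :
    (fAltLoop lista p u stack).1.foldl (fun acc pr => pr.1 + acc + pr.2)
      ((PySem.List.slice lista (some (fAltLoop lista p u stack).2.1)
        (some ((fAltLoop lista p u stack).2.2 + 1))).sum)
    = stack.foldl (fun acc pr => pr.1 + acc + pr.2) (f lista p u) := by
  induction p, u, stack using fAltLoop.induct lista with
  | case1 p u stack h =>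
      rw [fAltLoop, if_pos h, f, if_pos h]
  | case2 p u stack h k ih =>
      rw [fAltLoop, if_neg h]
      simp only at ih ⊢
      rw [ih]
      conv_rhs => rw [f, if_neg h]
      have hk : k = (u - p + 1) / 3 := PySem.Int.floordiv_eq_ediv_of_pos (by norm_num)
      simp [List.foldl, hk]

-- ===== VERDICT (by name: the statement is the Claim_ definition above) =====
theorem f_spec : Claim_equal_f := by
  intro lista p u _
  unfold Spec_f f_alt
  exact (fAltLoop_spec lista p u []).symm
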